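-- pv_equiv track=rewrite | github.com/qqzxingchen/MarkDownEditor | CodeEditor/CustomVersion/Python3Version/PythonTextDocument.py | __calcSharpAndQuotePoss
-- ===== SOURCE A (Python) =====
-- def __calcSharpAndQuotePoss(lineText):
--     arr = []
--     index = 0
--     while index < len(lineText):
--         if ["'",'"','#'].count( lineText[index] ) == 0:
--             index += 1
--             continue
--
--         if lineText[index] == '#':
--             pos = index
--             token = '#'
--         elif lineText[index] == '\'' or lineText[index] == '\"':
--             pos = index
--             token = lineText[index]
--
--             for c in lineText[index+1:]:
--                 if c == token[0]:
--                     token += c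
--                 else:
--                     break
--
--         arr.append( (pos,token) )
--         index += len(token)
--     return arr
-- ===== SOURCE B (Python) =====
-- def __calcSharpAndQuotePoss(lineText):
--     arr = []
--     n = len(lineText)
--     i = 0
--     while i < n:
--         c = lineText[i]
--         j = i + 1
--         while j < n and lineText[j] == c:
--             j += 1
--         if c == '#':
--             arr.extend((k, '#') for k in range(i, j))
--         elif c == "'" or c == '"':
--             arr.append((i, lineText[i:j]))
--         i = j
--     return arr
-- ===== Notes on version B (the rewrite author's own statement) =====
-- stated objective: alternative
-- what changed: Replaces the char-by-char index loop that builds each token by repeated string concatenation with a two-pointer run-length scanner: a second pointer finds each maximal run of equal characters once, hash runs are expanded arithmetically with a range, quote runs are emitted as a single slice, and other runs are skipped whole.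
import Mathlib
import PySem

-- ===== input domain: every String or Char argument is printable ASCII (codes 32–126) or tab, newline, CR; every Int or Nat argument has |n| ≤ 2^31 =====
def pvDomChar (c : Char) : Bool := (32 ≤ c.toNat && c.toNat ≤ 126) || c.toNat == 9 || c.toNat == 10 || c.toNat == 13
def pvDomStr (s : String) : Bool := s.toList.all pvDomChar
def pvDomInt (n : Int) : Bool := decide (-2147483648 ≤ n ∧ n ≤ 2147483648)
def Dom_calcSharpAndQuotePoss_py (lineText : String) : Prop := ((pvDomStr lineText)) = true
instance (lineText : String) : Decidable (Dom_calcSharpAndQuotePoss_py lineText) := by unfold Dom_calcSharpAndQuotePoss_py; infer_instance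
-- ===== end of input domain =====

-- B replaces A's char-by-char index loop (which builds each token by repeated concatenation)
-- by a two-pointer run-length scanner that handles each maximal run of equal characters at once.

-- ===== PORT A =====
-- while-loop of A as structural recursion on the remaining characters, carrying the index
def pvAScan : List Char → Int → List (Int × String)
  | [], _ => []
  | c :: rest, i =>
    if (['\'', '"', '#'].count c) = 0 then
      pvAScan rest (i + 1)
    else if c = '#' then
      (i, "#") :: pvAScan rest (i + 1)
    else
      -- quote branch: inner for-loop `token += c` = takeWhile over the tail
      let run := rest.takeWhile (fun x => x == c)
      (i, String.ofList (c :: run)) :: pvAScan (rest.drop run.length) (i + 1 + run.length)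
termination_by cs _ => cs.length
decreasing_by all_goals simp

def calcSharpAndQuotePoss_py (lineText : String) : List (Int × String) :=
  pvAScan lineText.toList 0

-- ===== PORT B =====
-- two-pointer scanner: `j` runs to the end of the run of `c`; the run is processed at once
def pvBScan : List Char → Int → List (Int × String)
  | [], _ => []
  | c :: rest, i =>
    let run := rest.takeWhile (fun x => x == c)
    let j := i + 1 + run.length
    (if c = '#' then (PySem.List.pyRange i j 1).map (fun k => (k, "#"))
     else if c = '\'' ∨ c = '"' then [(i, String.ofList (c :: run))]
     else []) ++ pvBScan (rest.drop run.length) j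
termination_by cs _ => cs.length
decreasing_by all_goals simp

def calcSharpAndQuotePoss_py_alt (lineText : String) : List (Int × String) :=
  pvBScan lineText.toList 0

-- ===== PRECONDITION & SPEC =====
def Spec_calcSharpAndQuotePoss_py (lineText : String) (out : List (Int × String)) : Prop := out = calcSharpAndQuotePoss_py_alt lineText
instance (lineText : String) (out : List (Int × String)) : Decidable (Spec_calcSharpAndQuotePoss_py lineText out) := by unfold Spec_calcSharpAndQuotePoss_py; infer_instance

-- ===== CLAIM (what is proved, stated in full; the proofs are below) =====
def Claim_equal_calcSharpAndQuotePoss_py : Prop := ∀ (lineText : String), Dom_calcSharpAndQuotePoss_py lineText → Spec_calcSharpAndQuotePoss_py lineText (calcSharpAndQuotePoss_py lineText)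

-- ===== LEMMAS AND PROOFS =====
lemma pv_drop_takeWhile (l : List Char) (p : Char → Bool) :
    l.drop (l.takeWhile p).length = l.dropWhile p := by
  induction l with
  | nil => rfl
  | cons a l ih =>
    by_cases h : p a
    · simp [h, ih]
    · simp [h]

lemma pv_mem_run (c x : Char) (l : List Char) (h : x ∈ l.takeWhile (fun y => y == c)) : x = c := by
  have := List.mem_takeWhile_imp h
  exact eq_of_beq this

lemma pv_pyRange_one_add (i : Int) (k : Nat) :
    PySem.List.pyRange i (i + (k : Int)) 1 = (List.range k).map (fun (t : Nat) => i + (t : Int)) := by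
  induction k generalizing i with
  | zero => simp [PySem.List.pyRange]
  | succ m ih =>
    rw [PySem.List.pyRange_one_cons (by omega), List.range_succ_eq_map, List.map_cons, List.map_map]
    rw [show i + ((m+1:Nat):Int) = (i+1) + (m:Int) by push_cast; ring, ih]
    congr 1
    · norm_num
    · exact List.map_congr_left fun t _ => by
        simp [Function.comp]; ring

-- A skips a run of non-target characters one position at a time
lemma pv_skip (r : List Char) (c : Char) (cs : List Char) (i : Int)
    (hr : ∀ x ∈ r, x = c) (hc : (['\'', '"', '#'].count c) = 0) :
    pvAScan (r ++ cs) i = pvAScan cs (i + r.length) := by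
  induction r generalizing i with
  | nil => simp
  | cons a r ih =>
    have ha : a = c := hr a (by simp)
    rw [List.cons_append, pvAScan, if_pos (ha ▸ hc), ih _ (fun x hx => hr x (List.mem_cons_of_mem _ hx))]
    congr 1
    simp only [List.length_cons]
    push_cast; ring

-- A emits a run of '#' one position at a time
lemma pv_sharp (r : List Char) (cs : List Char) (i : Int)
    (hr : ∀ x ∈ r, x = '#') :
    pvAScan (r ++ cs) i
      = (List.range r.length).map (fun (t : Nat) => (i + (t : Int), "#")) ++ pvAScan cs (i + r.length) := by
  induction r generalizing i with
  | nil => simp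
  | cons a r ih =>
    have ha : a = '#' := hr a (by simp)
    subst ha
    rw [List.cons_append, pvAScan, if_neg (by decide), if_pos rfl,
      ih _ (fun x hx => hr x (List.mem_cons_of_mem _ hx))]
    rw [show (i + 1 + (r.length : Int)) = i + ((r.length + 1 : Nat) : Int) by push_cast; ring]
    rw [← List.cons_append]
    simp only [List.length_cons]
    congr 1
    rw [List.range_succ_eq_map, List.map_cons, List.map_map]
    congr 1
    · norm_num
    · exact List.map_congr_left fun t _ => by
        simp [Function.comp, Prod.ext_iff]; ring

lemma pv_main (n : Nat) : ∀ (cs : List Char) (i : Int), cs.length ≤ n →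
    pvAScan cs i = pvBScan cs i := by
  induction n with
  | zero =>
    intro cs i h
    have : cs = [] := List.eq_nil_of_length_eq_zero (by omega)
    subst this; simp [pvAScan, pvBScan]
  | succ m ih =>
    intro cs i h
    match cs with
    | [] => simp [pvAScan, pvBScan]
    | c :: rest =>
      have hsplit : rest.takeWhile (fun x => x == c) ++ rest.drop (rest.takeWhile (fun x => x == c)).length = rest := by
        rw [pv_drop_takeWhile]; exact List.takeWhile_append_dropWhile
      have hlen : (rest.drop (rest.takeWhile (fun x => x == c)).length).length ≤ m := by
        simp only [List.length_cons] at h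
        simp [List.length_drop]; omega
      rw [pvBScan]
      by_cases h1 : (['\'', '"', '#'].count c) = 0
      · have hmem : c ∉ ['\'', '"', '#'] := List.count_eq_zero.mp h1
        have h2 : ¬ c = '#' := by intro hc; subst hc; simp at hmem
        have h3 : ¬ (c = '\'' ∨ c = '"') := by
          intro hc; rcases hc with hc | hc <;> (subst hc; simp at hmem)
        rw [pvAScan, if_pos h1, if_neg h2, if_neg h3]
        conv_lhs => rw [← hsplit]
        rw [pv_skip _ c _ _ (fun x hx => pv_mem_run c x rest hx) h1]
        rw [ih _ _ hlen]
        simp only [List.nil_append]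
      · have hmem : c ∈ ['\'', '"', '#'] := by
          by_contra hm; exact h1 (List.count_eq_zero.mpr hm)
        by_cases h2 : c = '#'
        · subst h2
          rw [pvAScan, if_neg h1, if_pos rfl, if_pos rfl]
          conv_lhs => rw [← hsplit]
          rw [pv_sharp _ _ _ (fun x hx => pv_mem_run '#' x rest hx)]
          rw [ih _ _ hlen]
          rw [show ((i:Int) + 1 + ((rest.takeWhile (fun x => x == '#')).length : Int))
              = i + (((rest.takeWhile (fun x => x == '#')).length + 1 : Nat) : Int) by push_cast; ring]
          rw [pv_pyRange_one_add, List.map_map]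
          rw [List.range_succ_eq_map, List.map_cons, List.map_map, ← List.cons_append]
          congr 2
          · norm_num
          · exact List.map_congr_left fun t _ => by
              simp [Function.comp, Prod.ext_iff]; ring
        · have h3 : c = '\'' ∨ c = '"' := by
            simp at hmem; rcases hmem with h | h | h
            · exact Or.inl h
            · exact Or.inr h
            · exact absurd h h2
          rw [pvAScan, if_neg h1, if_neg h2, if_neg h2, if_pos h3]
          simp only [List.singleton_append]
          exact congrArg (List.cons _) (ih _ _ hlen)

-- ===== VERDICT (by name: the statement is the Claim_ definition above) =====
theorem calcSharpAndQuotePoss_py_spec : Claim_equal_calcSharpAndQuotePoss_py := by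
  intro s _
  unfold Spec_calcSharpAndQuotePoss_py calcSharpAndQuotePoss_py calcSharpAndQuotePoss_py_alt
  exact pv_main s.toList.length s.toList 0 le_rfl
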